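-- pv_equiv track=rewrite | github.com/JonathanClaessens34/SideProjects | AdventCode/Day4/Day4.py | checkBoardColumns
-- ===== SOURCE A (Python) =====
-- def checkBoardColumns(board):
--     for i in range(len(board[0])):
--         columnGood = True
--         for j in range(len(board)):
--             if board[j][i] == False:
--                 columnGood = False
--                 break
--         if columnGood:
--             return True
--     return False
-- ===== SOURCE B (Python) =====
-- def checkBoardColumns(board):
--     ncols = len(board[0])
--     colGood = [True] * ncols
--     for row in board:
--         for i in range(ncols):
--             if row[i] == False:
--                 colGood[i] = False
--     return any(colGood)
-- ===== Notes on version B (the rewrite author's own statement) =====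
-- stated objective: alternative
-- what changed: Row-major single scan maintaining a per-column colGood accumulator vector, instead of A's column-major rescans of the whole board per column with early exit.
-- outside the precondition, e.g. on checkBoardColumns([[False], []]): A returns False, B raises IndexError
import Mathlib
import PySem

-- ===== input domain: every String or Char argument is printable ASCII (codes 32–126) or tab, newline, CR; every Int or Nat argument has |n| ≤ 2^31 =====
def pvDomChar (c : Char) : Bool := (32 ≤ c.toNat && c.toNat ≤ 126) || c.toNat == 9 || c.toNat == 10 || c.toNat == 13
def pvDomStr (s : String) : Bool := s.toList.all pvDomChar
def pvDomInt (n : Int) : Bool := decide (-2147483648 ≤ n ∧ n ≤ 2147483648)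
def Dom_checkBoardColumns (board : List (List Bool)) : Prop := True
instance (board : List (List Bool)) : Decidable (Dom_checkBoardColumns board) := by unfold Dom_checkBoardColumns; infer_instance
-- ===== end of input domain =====

-- B replaces A's column-major rescan-per-column (with early exit) by one row-major pass
-- maintaining a per-column accumulator vector (objective: alternative decomposition).

-- ===== PORT A =====
-- inner loop 'for j in range(len(board))' ported as structural recursion over the rows
-- (board[j] visits the rows in order); 'break' = returning false immediately.
-- board[j][i] is ported with PySem.List.pyGet? (exact); on an out-of-range access Python
-- raises IndexError, the port takes the default True there (such inputs are outside Pre_).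
def innerA (rows : List (List Bool)) (i : Nat) : Bool :=
  match rows with
  | [] => true
  | r :: rest =>
      if ((PySem.List.pyGet? r (↑i)).getD true) == false then false
      else innerA rest i

-- outer loop 'for i in range(len(board[0]))' with the early 'return True'
def outerA (board : List (List Bool)) : List Nat → Bool
  | [] => false
  | i :: rest => if innerA board i then true else outerA board rest

def checkBoardColumns (board : List (List Bool)) : Bool :=
  outerA board (List.range ((PySem.List.pyGet? board 0).getD []).length)

-- ===== PORT B =====
-- 'for i in range(ncols): if row[i] == False: colGood[i] = False'
def rowStep (row : List Bool) (ncols : Nat) (cg : List Bool) : List Bool :=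
  (List.range ncols).foldl
    (fun (cg : List Bool) (i : Nat) =>
      if ((PySem.List.pyGet? row (↑i)).getD true) == false then cg.set i false else cg)
    cg

def checkBoardColumns_alt (board : List (List Bool)) : Bool :=
  let ncols := ((PySem.List.pyGet? board 0).getD []).length
  (board.foldl (fun cg row => rowStep row ncols cg) (List.replicate ncols true)).any id

-- ===== PRECONDITION & SPEC =====
-- Pre_ excludes the empty board and ragged boards with a row shorter than the first row:
-- on those the Pythons raise IndexError, except for a few ragged boards where A happens to
-- return before probing the short row (an accident of its scan order) while B still raises.
def Pre_checkBoardColumns (board : List (List Bool)) : Prop :=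
  board ≠ [] ∧ ∀ r ∈ board, (board.headD []).length ≤ r.length
instance (board : List (List Bool)) : Decidable (Pre_checkBoardColumns board) := by
  unfold Pre_checkBoardColumns; infer_instance

def pvWitness_checkBoardColumns : List (List Bool) := [[true, false], [false, true]]

def Spec_checkBoardColumns (board : List (List Bool)) (out : Bool) : Prop := out = checkBoardColumns_alt board
instance (board : List (List Bool)) (out : Bool) : Decidable (Spec_checkBoardColumns board out) := by unfold Spec_checkBoardColumns; infer_instance

-- ===== CLAIM (what is proved, stated in full; the proofs are below) =====
def Claim_equal_checkBoardColumns : Prop := ∀ (board : List (List Bool)), Dom_checkBoardColumns board → Pre_checkBoardColumns board → Spec_checkBoardColumns board (checkBoardColumns board)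

-- ===== LEMMAS AND PROOFS =====

-- the value Python reads at board cell (row, column j), totalized as in both ports
def cell (row : List Bool) (j : Nat) : Bool := (row[j]?).getD true

theorem innerA_eq_all (rows : List (List Bool)) (i : Nat) :
    innerA rows i = rows.all (fun r => cell r i) := by
  induction rows with
  | nil => rfl
  | cons r rest ih =>
      simp only [innerA, cell, List.all_cons, PySem.List.pyGet?_natCast]
      cases h : (r[i]?).getD true <;> simp [ih, cell]

theorem outerA_eq_any (board : List (List Bool)) (is : List Nat) :
    outerA board is = is.any (fun i => innerA board i) := by
  induction is with
  | nil => rfl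
  | cons i rest ih =>
      simp only [outerA, List.any_cons]
      cases h : innerA board i <;> simp [ih]

theorem foldl_set_length (p : Nat → Bool) (l : List Nat) (cg : List Bool) :
    (l.foldl (fun (cg : List Bool) (i : Nat) => if p i then cg.set i false else cg) cg).length
      = cg.length := by
  induction l generalizing cg with
  | nil => rfl
  | cons i rest ih =>
      simp only [List.foldl_cons]
      rw [ih]
      split <;> simp

theorem foldl_range_getElem? (row : List Bool) (n : Nat) (cg : List Bool) (j : Nat) :
    ((List.range n).foldl
        (fun (cg : List Bool) (i : Nat) => if (cell row i) == false then cg.set i false else cg)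
        cg)[j]?
      = if j < n then (cg[j]?).map (fun b => b && cell row j) else cg[j]? := by
  induction n with
  | zero => simp
  | succ n ih =>
      rw [List.range_succ, List.foldl_append]
      simp only [List.foldl_cons, List.foldl_nil]
      by_cases hj : j < n
      · have hne : n ≠ j := by omega
        split
        · rw [List.getElem?_set_ne hne, ih]
          simp [hj, Nat.lt_succ_of_lt hj]
        · rw [ih]; simp [hj, Nat.lt_succ_of_lt hj]
      · by_cases hjn : j = n
        · subst hjn
          have base : ((List.range j).foldl
              (fun (cg : List Bool) (i : Nat) =>
                if (cell row i) == false then cg.set i false else cg) cg)[j]?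
              = cg[j]? := by rw [ih]; simp
          have hlen := foldl_set_length (fun i => (cell row i) == false) (List.range j) cg
          split
          · rename_i hfalse
            have hc : cell row j = false := by
              cases h : cell row j
              · rfl
              · rw [h] at hfalse; simp at hfalse
            by_cases hl : j < cg.length
            · rw [List.getElem?_set_self (by rw [hlen]; exact hl), hc]
              rw [List.getElem?_eq_getElem hl] at base ⊢
              simp
            · rw [List.set_eq_of_length_le (by rw [hlen]; omega), base]
              simp [List.getElem?_eq_none (show cg.length ≤ j by omega)]
          · rename_i htrue
            have hc : cell row j = true := by
              cases h : cell row j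
              · rw [h] at htrue; simp at htrue
              · rfl
            rw [base, hc]
            cases cg[j]? <;> simp
        · have hj1 : ¬ j < n + 1 := by omega
          have hne : n ≠ j := by omega
          split
          · rw [List.getElem?_set_ne hne, ih]; simp [hj]
          · rw [ih]; simp [hj]

theorem rowStep_getElem? (row : List Bool) (ncols : Nat) (cg : List Bool) (j : Nat)
    (hj : j < ncols) :
    (rowStep row ncols cg)[j]? = (cg[j]?).map (fun b => b && cell row j) := by
  unfold rowStep
  have h := foldl_range_getElem? row ncols cg j
  simp only [cell, PySem.List.pyGet?_natCast] at h ⊢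
  rw [if_pos hj] at h
  exact h

theorem rowStep_length (row : List Bool) (ncols : Nat) (cg : List Bool) :
    (rowStep row ncols cg).length = cg.length := by
  unfold rowStep
  exact foldl_set_length (fun i => ((PySem.List.pyGet? row (↑i)).getD true) == false) _ cg

theorem rowsFold_length (board : List (List Bool)) (ncols : Nat) (cg : List Bool) :
    (board.foldl (fun cg row => rowStep row ncols cg) cg).length = cg.length := by
  induction board generalizing cg with
  | nil => rfl
  | cons r rest ih =>
      simp only [List.foldl_cons]
      rw [ih, rowStep_length]

theorem rowsFold_getElem? (board : List (List Bool)) (ncols : Nat) (cg : List Bool) (j : Nat)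
    (hj : j < ncols) :
    (board.foldl (fun cg row => rowStep row ncols cg) cg)[j]?
      = (cg[j]?).map (fun b => b && board.all (fun r => cell r j)) := by
  induction board generalizing cg with
  | nil => cases h : cg[j]? <;> simp [h]
  | cons r rest ih =>
      simp only [List.foldl_cons, List.all_cons]
      rw [ih, rowStep_getElem? r ncols cg j hj]
      cases h : cg[j]? <;> simp [Bool.and_assoc]

theorem colGood_eq_map (board : List (List Bool)) (ncols : Nat) :
    board.foldl (fun cg row => rowStep row ncols cg) (List.replicate ncols true)
      = (List.range ncols).map (fun j => board.all (fun r => cell r j)) := by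
  apply List.ext_getElem?
  intro j
  by_cases hj : j < ncols
  · rw [rowsFold_getElem? board ncols _ j hj]
    simp [hj]
  · have h1 : (board.foldl (fun cg row => rowStep row ncols cg)
        (List.replicate ncols true))[j]? = none := by
      apply List.getElem?_eq_none
      rw [rowsFold_length]; simp; omega
    have h2 : ((List.range ncols).map
        (fun j => board.all (fun r => cell r j)))[j]? = none := by
      apply List.getElem?_eq_none; simp; omega
    rw [h1, h2]

-- ===== VERDICT (by name: the statement is the Claim_ definition above) =====
theorem checkBoardColumns_spec : Claim_equal_checkBoardColumns := by
  intro board _ _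
  unfold Spec_checkBoardColumns
  simp only [checkBoardColumns, checkBoardColumns_alt]
  rw [outerA_eq_any, colGood_eq_map]
  simp [innerA_eq_all, List.any_map]
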